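-- pv_equiv track=rewrite | github.com/MiguelOrnia/websemantica | Ejercicio4/project/util/strings_helper.py | formatear_mayusculas
-- ===== SOURCE A (Python) =====
-- def formatear_mayusculas(cadena):
--     primera_letra = False
--     cadena_formateada = cadena[0]
--     for word in cadena:
--         if word != cadena[0] or primera_letra:
--             cadena_formateada += word.lower()
--             primera_letra = True
--     return cadena_formateada
-- ===== SOURCE B (Python) =====
-- def formatear_mayusculas(cadena):
--     c0 = cadena[0]
--     return c0 + cadena.lstrip(c0).lower()
-- ===== Notes on version B (the rewrite author's own statement) =====
-- stated objective: simpler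
-- what changed: Replaces the flag-driven character loop (which builds the result by repeated string concatenation) with a direct decomposition: keep cadena[0], strip the leading run of it with lstrip, lowercase the remainder in one call.
import Mathlib
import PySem

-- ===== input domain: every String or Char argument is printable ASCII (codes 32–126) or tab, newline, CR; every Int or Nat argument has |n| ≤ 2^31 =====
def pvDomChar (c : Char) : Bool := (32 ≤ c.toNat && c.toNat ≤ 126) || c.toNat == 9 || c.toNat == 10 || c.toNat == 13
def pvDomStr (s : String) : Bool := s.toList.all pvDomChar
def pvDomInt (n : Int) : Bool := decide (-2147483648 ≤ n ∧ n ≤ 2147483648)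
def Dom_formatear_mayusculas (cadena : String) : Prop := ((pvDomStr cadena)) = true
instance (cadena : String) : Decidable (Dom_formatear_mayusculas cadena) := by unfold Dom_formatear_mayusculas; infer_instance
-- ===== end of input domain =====

-- B replaces A's flag-driven accumulator loop with a direct decomposition:
-- keep the first character, drop the leading run of it, lowercase the rest.


-- ===== PORT A =====
-- transliteration of A: cadena[0] (IndexError on "" is excluded by Pre_),
-- then a fold over the characters carrying the (primera_letra, cadena_formateada) state.
def formatear_mayusculas (cadena : String) : String :=
  match PySem.Str.pyGet? cadena 0 with
  | none => ""          -- cadena[0] raises IndexError; unreachable under Pre_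
  | some c0 =>
    let st := cadena.toList.foldl
      (fun (st : Bool × List Char) word =>
        if word != c0 || st.1 then (true, st.2 ++ [PySem.Chars.lowerChar word]) else st)
      (false, [c0])
    String.mk st.2

-- ===== PORT B =====
-- transliteration of B: c0 = cadena[0]; c0 + cadena.lstrip(c0).lower().
-- lstrip with a one-character strip set is exactly dropWhile (· == c0).
def formatear_mayusculas_alt (cadena : String) : String :=
  match PySem.Str.pyGet? cadena 0 with
  | none => ""          -- cadena[0] raises IndexError; unreachable under Pre_
  | some c0 =>
    String.mk (c0 :: PySem.Chars.lower (cadena.toList.dropWhile (· == c0)))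

-- ===== PRECONDITION & SPEC =====
-- A raises IndexError (cadena[0]) exactly on the empty string.
def Pre_formatear_mayusculas (cadena : String) : Prop := cadena ≠ ""
instance (cadena : String) : Decidable (Pre_formatear_mayusculas cadena) := by unfold Pre_formatear_mayusculas; infer_instance
def pvWitness_formatear_mayusculas : String := "AAbC"

def Spec_formatear_mayusculas (cadena : String) (out : String) : Prop := out = formatear_mayusculas_alt cadena
instance (cadena : String) (out : String) : Decidable (Spec_formatear_mayusculas cadena out) := by unfold Spec_formatear_mayusculas; infer_instance

-- ===== CLAIM (what is proved, stated in full; the proofs are below) =====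
def Claim_equal_formatear_mayusculas : Prop := ∀ (cadena : String), Dom_formatear_mayusculas cadena → Pre_formatear_mayusculas cadena → Spec_formatear_mayusculas cadena (formatear_mayusculas cadena)

-- ===== LEMMAS AND PROOFS =====

-- A's loop from the flag-up state appends every remaining char lowercased.
theorem pv_foldl_true (c0 : Char) :
    ∀ (l acc : List Char),
      l.foldl (fun (st : Bool × List Char) word =>
          if word != c0 || st.1 then (true, st.2 ++ [PySem.Chars.lowerChar word]) else st)
        (true, acc)
      = (true, acc ++ l.map PySem.Chars.lowerChar) := by
  intro l
  induction l with
  | nil => simp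
  | cons w t ih =>
    intro acc
    rw [List.foldl_cons, if_pos (Bool.or_true _), ih]
    simp

-- A's loop from the flag-down state skips the leading run of c0 and lowercases the rest.
theorem pv_foldl_false (c0 : Char) :
    ∀ (l acc : List Char),
      l.foldl (fun (st : Bool × List Char) word =>
          if word != c0 || st.1 then (true, st.2 ++ [PySem.Chars.lowerChar word]) else st)
        (false, acc)
      = (decide (l.dropWhile (· == c0) ≠ []),
         acc ++ (l.dropWhile (· == c0)).map PySem.Chars.lowerChar) := by
  intro l
  induction l with
  | nil => simp
  | cons w t ih =>
    intro acc
    by_cases h : w = c0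
    · subst h
      rw [List.foldl_cons, if_neg (by simp), ih]
      simp [List.dropWhile]
    · have hc : (w != c0 || false) = true := by simp [h]
      have hb : (w == c0) = false := by simpa using h
      have hd : (w :: t).dropWhile (· == c0) = w :: t := by
        simp [List.dropWhile, hb]
      rw [List.foldl_cons, if_pos hc, pv_foldl_true, hd]
      simp

-- PySem lowercasing of a char list is the map of lowerChar.
theorem pv_lower_eq_map (l : List Char) :
    PySem.Chars.lower l = l.map PySem.Chars.lowerChar := rfl

-- ===== VERDICT (by name: the statement is the Claim_ definition above) =====
theorem formatear_mayusculas_spec : Claim_equal_formatear_mayusculas := by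
  intro cadena _ hpre
  unfold Spec_formatear_mayusculas formatear_mayusculas formatear_mayusculas_alt
  have hne : cadena.toList ≠ [] := by
    intro h
    exact hpre (by simpa using congrArg String.ofList h)
  obtain ⟨c0, rest, hl⟩ := List.exists_cons_of_ne_nil hne
  have hget : PySem.Str.pyGet? cadena 0 = some c0 := by
    simp [hl]
  rw [hget, hl]
  show String.mk ((c0 :: rest).foldl
      (fun (st : Bool × List Char) word =>
        if word != c0 || st.1 then (true, st.2 ++ [PySem.Chars.lowerChar word]) else st)
      (false, [c0])).2 = _
  rw [pv_foldl_false c0]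
  simp [pv_lower_eq_map]
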